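-- pv_equiv track=rewrite | github.com/Ag3497120/verantyx-v6 | synth_results/fd02da9e.py | transform
-- ===== SOURCE A (Python) =====
-- def transform(grid):
--     rows = len(grid)
--     cols = len(grid[0])
--     bg = 7
--     result = [row[:] for row in grid]
--
--     # Find non-background corners
--     corners = [(0,0), (0,cols-1), (rows-1,0), (rows-1,cols-1)]
--
--     for (r,c) in corners:
--         v = grid[r][c]
--         if v == bg: continue
--         # Clear corner
--         result[r][c] = bg
--
--         if r == 0 and c == 0:  # top-left
--             # 2x2 at (1,1),(1,2),(2,1),(2,2)
--             for dr in [1,2]: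
--                 for dc in [1,2]:
--                     if r+dr < rows and c+dc < cols:
--                         result[r+dr][c+dc] = v
--         elif r == 0 and c == cols-1:  # top-right
--             # 2x2 at (1,c-2),(1,c-1),(2,c-2),(2,c-1)
--             for dr in [1,2]:
--                 for dc in [-2,-1]:
--                     if r+dr < rows and c+dc >= 0:
--                         result[r+dr][c+dc] = v
--         elif r == rows-1 and c == 0:  # bottom-left
--             # L-shape at (r-3,2),(r-2,2),(r-1,3)
--             offsets = [(-3,2),(-2,2),(-1,3)]
--             for dr,dc in offsets:
--                 if 0 <= r+dr < rows and 0 <= c+dc < cols: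
--                     result[r+dr][c+dc] = v
--         elif r == rows-1 and c == cols-1:  # bottom-right
--             # L-shape at (r-3,c-2),(r-2,c-2),(r-1,c-3)
--             offsets = [(-3,-2),(-2,-2),(-1,-3)]
--             for dr,dc in offsets:
--                 if 0 <= r+dr < rows and 0 <= c+dc < cols:
--                     result[r+dr][c+dc] = v
--
--     return result
-- ===== SOURCE B (Python) =====
-- def transform(grid):
--     rows, cols = len(grid), len(grid[0])
--     bg = 7
--
--     def offsets(r, c):
--         if r == 0 and c == 0:
--             return [(1, 1), (1, 2), (2, 1), (2, 2)]
--         if r == 0 and c == cols - 1: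
--             return [(1, -2), (1, -1), (2, -2), (2, -1)]
--         if r == rows - 1 and c == 0:
--             return [(-3, 2), (-2, 2), (-1, 3)]
--         return [(-3, -2), (-2, -2), (-1, -3)]
--
--     corners = [(0, 0), (0, cols - 1), (rows - 1, 0), (rows - 1, cols - 1)]
--
--     # Gather per cell: the last corner (in processing order) that writes (i, j)
--     # decides its value, so scan the corners in reverse priority.
--     def cell(i, j):
--         for r, c in reversed(corners):
--             v = grid[r][c]
--             if v == bg:
--                 continue
--             if any(i == r + dr and j == c + dc for dr, dc in offsets(r, c)):
--                 return v
--             if (i, j) == (r, c):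
--                 return bg
--         return grid[i][j]
--
--     return [[cell(i, j) for j in range(cols)] for i in range(rows)]
-- ===== Notes on version B (the rewrite author's own statement) =====
-- stated objective: alternative
-- what changed: A scatters: it mutates a copied grid, writing the four corner clears and stamp regions in order; B gathers: it never mutates anything and computes each output cell independently by scanning the corners in reverse priority order and returning the value of the last write that would target that cell (stamp hit, then corner clear), falling back to the original cell.
-- outside the precondition, e.g. on transform([[7, 7], [7, 7, 1]]): A returns [[7, 7], [7, 7, 1]], B returns [[7, 7], [7, 7]]; on transform([]): A raises IndexError, B raises IndexError
import Mathlib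
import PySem

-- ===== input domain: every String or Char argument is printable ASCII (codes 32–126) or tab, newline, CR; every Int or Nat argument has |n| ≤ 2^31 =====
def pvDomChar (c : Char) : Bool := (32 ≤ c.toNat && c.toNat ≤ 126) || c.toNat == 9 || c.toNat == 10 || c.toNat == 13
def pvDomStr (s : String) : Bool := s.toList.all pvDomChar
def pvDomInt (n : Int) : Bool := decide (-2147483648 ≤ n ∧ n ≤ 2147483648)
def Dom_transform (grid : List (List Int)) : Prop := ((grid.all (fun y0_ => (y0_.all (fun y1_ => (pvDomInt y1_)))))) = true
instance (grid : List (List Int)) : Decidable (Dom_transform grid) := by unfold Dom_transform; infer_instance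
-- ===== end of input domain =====

-- B replaces A's scatter (mutating a copied grid with corner clears and stamp writes, in order)
-- by a gather: each output cell is computed independently by scanning the corners in reverse
-- priority for the last write targeting it (objective: alternative; same cost).

-- ===== PORT A =====
-- grid[r][c]: exact for in-range non-negative indices, which Pre_transform guarantees
def getCell (g : List (List Int)) (r c : Int) : Int :=
  (g.getD r.toNat []).getD c.toNat 0

-- result[r][c] = v: exact for in-range non-negative indices, which Pre_transform guarantees
def setCell (g : List (List Int)) (r c v : Int) : List (List Int) :=
  g.set r.toNat ((g.getD r.toNat []).set c.toNat v)

-- the body of A's `for (r,c) in corners` loop, step for step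
def cornerStepA (grid : List (List Int)) (rows cols : Int)
    (result : List (List Int)) (rc : Int × Int) : List (List Int) :=
  let r := rc.1
  let c := rc.2
  let bg : Int := 7
  let v := getCell grid r c
  if v = bg then result
  else
    let result := setCell result r c bg
    if r = 0 ∧ c = 0 then
      ([1, 2] : List Int).foldl (fun res dr =>
        ([1, 2] : List Int).foldl (fun res dc =>
          if r + dr < rows ∧ c + dc < cols then setCell res (r + dr) (c + dc) v else res) res) result
    else if r = 0 ∧ c = cols - 1 then
      ([1, 2] : List Int).foldl (fun res dr =>
        ([-2, -1] : List Int).foldl (fun res dc =>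
          if r + dr < rows ∧ 0 ≤ c + dc then setCell res (r + dr) (c + dc) v else res) res) result
    else if r = rows - 1 ∧ c = 0 then
      ([(-3, 2), (-2, 2), (-1, 3)] : List (Int × Int)).foldl (fun res d =>
        if 0 ≤ r + d.1 ∧ r + d.1 < rows ∧ (0 ≤ c + d.2 ∧ c + d.2 < cols)
        then setCell res (r + d.1) (c + d.2) v else res) result
    else if r = rows - 1 ∧ c = cols - 1 then
      ([(-3, -2), (-2, -2), (-1, -3)] : List (Int × Int)).foldl (fun res d =>
        if 0 ≤ r + d.1 ∧ r + d.1 < rows ∧ (0 ≤ c + d.2 ∧ c + d.2 < cols)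
        then setCell res (r + d.1) (c + d.2) v else res) result
    else result

def transform (grid : List (List Int)) : List (List Int) :=
  let rows : Int := grid.length
  let cols : Int := (grid.headD []).length
  -- result = [row[:] for row in grid]: the copy is the identity on immutable Lean lists
  let corners : List (Int × Int) := [(0, 0), (0, cols - 1), (rows - 1, 0), (rows - 1, cols - 1)]
  corners.foldl (cornerStepA grid rows cols) grid

-- ===== PORT B =====
-- Source B's offsets(r, c): the same if-chain dispatch on the corner coordinates
def offsB (rows cols r c : Int) : List (Int × Int) :=
  if r = 0 ∧ c = 0 then [(1, 1), (1, 2), (2, 1), (2, 2)]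
  else if r = 0 ∧ c = cols - 1 then [(1, -2), (1, -1), (2, -2), (2, -1)]
  else if r = rows - 1 ∧ c = 0 then [(-3, 2), (-2, 2), (-1, 3)]
  else [(-3, -2), (-2, -2), (-1, -3)]

-- Source B's cell(i, j): the `for r, c in reversed(corners)` loop, consuming the reversed list
def cellLoop (grid : List (List Int)) (rows cols i j : Int) : List (Int × Int) → Int
  | [] => getCell grid i j
  | (r, c) :: rest =>
    let v := getCell grid r c
    if v = 7 then cellLoop grid rows cols i j rest
    else if (offsB rows cols r c).any (fun o => decide (i = r + o.1 ∧ j = c + o.2)) then v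
    else if (i, j) = (r, c) then 7
    else cellLoop grid rows cols i j rest

def transform_alt (grid : List (List Int)) : List (List Int) :=
  let rows : Int := grid.length
  let cols : Int := (grid.headD []).length
  let corners : List (Int × Int) := [(0, 0), (0, cols - 1), (rows - 1, 0), (rows - 1, cols - 1)]
  (PySem.List.pyRange 0 rows 1).map (fun i =>
    (PySem.List.pyRange 0 cols 1).map (fun j => cellLoop grid rows cols i j corners.reverse))

-- ===== PRECONDITION & SPEC =====
-- Pre_ excludes the empty grid (A raises IndexError on grid[0]) and ragged grids, on which
-- A's reads/writes through cols = len(grid[0]) raise IndexError or hit rows of other lengths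
-- depending on accidental row lengths.
def Pre_transform (grid : List (List Int)) : Prop :=
  grid ≠ [] ∧ grid.headD [] ≠ [] ∧ ∀ row ∈ grid, row.length = (grid.headD []).length
instance (grid : List (List Int)) : Decidable (Pre_transform grid) := by
  unfold Pre_transform; infer_instance

def pvWitness_transform : List (List Int) := [[1, 7], [7, 7]]

def Spec_transform (grid : List (List Int)) (out : List (List Int)) : Prop := out = transform_alt grid
instance (grid : List (List Int)) (out : List (List Int)) : Decidable (Spec_transform grid out) := by unfold Spec_transform; infer_instance

-- ===== CLAIM (what is proved, stated in full; the proofs are below) =====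
def Claim_equal_transform : Prop := ∀ (grid : List (List Int)), Dom_transform grid → Pre_transform grid → Spec_transform grid (transform grid)

-- ===== LEMMAS AND PROOFS =====

-- proof-internal: A's in-place writes rephrased as a dict of pending updates over the grid
def applyUpd (u : PySem.Dict (Int × Int) Int) (g : List (List Int)) : List (List Int) :=
  (PySem.List.enumerate g).map (fun p =>
    (PySem.List.enumerate p.2).map (fun q => u.getD (p.1, q.1) q.2))

def dictStep (grid : List (List Int)) (rows cols : Int)
    (u : PySem.Dict (Int × Int) Int) (t : Int × Int × List (Int × Int)) :
    PySem.Dict (Int × Int) Int :=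
  let r := t.1
  let c := t.2.1
  let offs := t.2.2
  let v := getCell grid r c
  if v = 7 then u
  else
    offs.foldl (fun u o =>
      if 0 ≤ r + o.1 ∧ r + o.1 < rows ∧ (0 ≤ c + o.2 ∧ c + o.2 < cols)
      then u.insert (r + o.1, c + o.2) v else u) (u.insert (r, c) 7)

lemma getElem?_applyUpd (u : PySem.Dict (Int × Int) Int) (g : List (List Int)) (i : Nat) :
    (applyUpd u g)[i]?
    = (g[i]?).map (fun row => (PySem.List.enumerate row).map (fun q => u.getD ((i : Int), q.1) q.2)) := by
  simp only [applyUpd, List.getElem?_map, PySem.List.getElem?_enumerate, Option.map_map]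
  cases g[i]? <;> simp

lemma getElem?_rowMap (u : PySem.Dict (Int × Int) Int) (i : Nat) (row : List Int) (j : Nat) :
    ((PySem.List.enumerate row).map (fun q => u.getD ((i : Int), q.1) q.2))[j]?
    = row[j]?.map (fun x => u.getD ((i : Int), (j : Int)) x) := by
  simp only [List.getElem?_map, PySem.List.getElem?_enumerate, Option.map_map]
  cases row[j]? <;> simp

lemma applyUpd_insert (g : List (List Int)) (W : Nat)
    (hrect : ∀ row ∈ g, row.length = W)
    (u : PySem.Dict (Int × Int) Int) (r c v : Int)
    (hr0 : 0 ≤ r) (hr : r < (g.length : Int)) (hc0 : 0 ≤ c) (hc : c < (W : Int)) :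
    applyUpd (u.insert (r, c) v) g = setCell (applyUpd u g) r c v := by
  have hrn : ((r.toNat : Nat) : Int) = r := Int.toNat_of_nonneg hr0
  have hcn : ((c.toNat : Nat) : Int) = c := Int.toNat_of_nonneg hc0
  have hrl : r.toNat < g.length := by omega
  have hrow : (applyUpd u g)[r.toNat]?
      = some ((PySem.List.enumerate (g[r.toNat])).map (fun q => u.getD ((r.toNat : Int), q.1) q.2)) := by
    rw [getElem?_applyUpd, List.getElem?_eq_getElem hrl]
    rfl
  apply List.ext_getElem?
  intro i
  rw [getElem?_applyUpd]
  unfold setCell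
  by_cases hi : i = r.toNat
  · subst hi
    rw [List.getElem?_set_self', hrow]
    have hgd : (applyUpd u g).getD r.toNat []
        = (PySem.List.enumerate (g[r.toNat])).map (fun q => u.getD ((r.toNat : Int), q.1) q.2) := by
      rw [List.getD_eq_getElem?_getD, hrow]; rfl
    rw [hgd, List.getElem?_eq_getElem hrl]
    simp only [Option.map_some]
    congr 1
    simp only [Function.const_apply]
    have hlen : (g[r.toNat]).length = W := hrect _ (List.getElem_mem hrl)
    apply List.ext_getElem?
    intro j
    rw [getElem?_rowMap]
    by_cases hj : j = c.toNat
    · subst hj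
      rw [List.getElem?_set_self', getElem?_rowMap]
      have hk : ((r.toNat : Int), (c.toNat : Int)) = (r, c) := by rw [hrn, hcn]
      have hjl : c.toNat < (g[r.toNat]).length := by omega
      rw [List.getElem?_eq_getElem hjl]
      simp only [Option.map_some]
      rw [PySem.Dict.getD_insert, if_pos hk]
      rfl
    · rw [List.getElem?_set_ne (fun h => hj h.symm), getElem?_rowMap]
      have hk : ((r.toNat : Int), (j : Int)) ≠ (r, c) := by
        intro h
        have := congrArg Prod.snd h
        simp at this
        omega
      cases g[r.toNat][j]? with
      | none => rfl
      | some x =>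
        simp only [Option.map_some]
        rw [PySem.Dict.getD_insert, if_neg hk]
  · rw [List.getElem?_set_ne (fun h => hi h.symm), getElem?_applyUpd]
    cases hgi : g[i]? with
    | none => rfl
    | some row =>
      simp only [Option.map_some, Option.some.injEq]
      apply List.map_congr_left
      intro q _
      have hk : ((i : Int), q.1) ≠ (r, c) := by
        intro h
        have := congrArg Prod.fst h
        simp at this
        omega
      rw [PySem.Dict.getD_insert, if_neg hk]

lemma gw (g : List (List Int)) (W : Nat) (hrect : ∀ row ∈ g, row.length = W)
    (res : List (List Int)) (u : PySem.Dict (Int × Int) Int) (r c v : Int)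
    (P Q : Prop) [Decidable P] [Decidable Q]
    (hres : res = applyUpd u g) (hPQ : P ↔ Q)
    (hb : P → 0 ≤ r ∧ r < (g.length : Int) ∧ 0 ≤ c ∧ c < (W : Int)) :
    (if P then setCell res r c v else res)
      = applyUpd (if Q then u.insert (r, c) v else u) g := by
  by_cases hp : P
  · obtain ⟨h1, h2, h3, h4⟩ := hb hp
    rw [if_pos hp, if_pos (hPQ.mp hp), applyUpd_insert g W hrect u r c v h1 h2 h3 h4, hres]
  · rw [if_neg hp, if_neg (fun hq => hp (hPQ.mpr hq)), hres]

lemma slot1_sim (g : List (List Int)) (W : Nat) (hrect : ∀ row ∈ g, row.length = W)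
    (hg : 1 ≤ g.length) (hW : 1 ≤ W) (u : PySem.Dict (Int × Int) Int) :
    cornerStepA g (g.length : Int) (W : Int) (applyUpd u g) (0, 0)
      = applyUpd (dictStep g (g.length : Int) (W : Int) u (0, 0, [(1, 1), (1, 2), (2, 1), (2, 2)])) g := by
  unfold cornerStepA dictStep
  simp only [List.foldl_cons, List.foldl_nil]
  by_cases hv : getCell g 0 0 = 7
  · rw [if_pos hv, if_pos hv]
  · rw [if_neg hv, if_neg hv]
    rw [if_pos (⟨trivial, trivial⟩ : True ∧ True)]
    have h0 : setCell (applyUpd u g) 0 0 7 = applyUpd (u.insert (0, 0) 7) g :=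
      (applyUpd_insert g W hrect u 0 0 7 le_rfl (by omega) le_rfl (by omega)).symm
    have h1 := gw g W hrect _ _ (0 + 1) (0 + 1) (getCell g 0 0)
      ((0:Int) + 1 < (g.length : Int) ∧ (0:Int) + 1 < (W : Int))
      ((0:Int) ≤ 0 + 1 ∧ (0:Int) + 1 < (g.length : Int) ∧ ((0:Int) ≤ 0 + 1 ∧ (0:Int) + 1 < (W : Int)))
      h0 (by omega) (by omega)
    have h2 := gw g W hrect _ _ (0 + 1) (0 + 2) (getCell g 0 0)
      ((0:Int) + 1 < (g.length : Int) ∧ (0:Int) + 2 < (W : Int))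
      ((0:Int) ≤ 0 + 1 ∧ (0:Int) + 1 < (g.length : Int) ∧ ((0:Int) ≤ 0 + 2 ∧ (0:Int) + 2 < (W : Int)))
      h1 (by omega) (by omega)
    have h3 := gw g W hrect _ _ (0 + 2) (0 + 1) (getCell g 0 0)
      ((0:Int) + 2 < (g.length : Int) ∧ (0:Int) + 1 < (W : Int))
      ((0:Int) ≤ 0 + 2 ∧ (0:Int) + 2 < (g.length : Int) ∧ ((0:Int) ≤ 0 + 1 ∧ (0:Int) + 1 < (W : Int)))
      h2 (by omega) (by omega)
    have h4 := gw g W hrect _ _ (0 + 2) (0 + 2) (getCell g 0 0)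
      ((0:Int) + 2 < (g.length : Int) ∧ (0:Int) + 2 < (W : Int))
      ((0:Int) ≤ 0 + 2 ∧ (0:Int) + 2 < (g.length : Int) ∧ ((0:Int) ≤ 0 + 2 ∧ (0:Int) + 2 < (W : Int)))
      h3 (by omega) (by omega)
    exact h4

lemma slot2_sim (g : List (List Int)) (W : Nat) (hrect : ∀ row ∈ g, row.length = W)
    (hg : 1 ≤ g.length) (hW : 1 ≤ W) (u : PySem.Dict (Int × Int) Int) :
    cornerStepA g (g.length : Int) (W : Int) (applyUpd u g) (0, (W : Int) - 1)
      = applyUpd (dictStep g (g.length : Int) (W : Int) u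
          (0, (W : Int) - 1, [(1, -2), (1, -1), (2, -2), (2, -1)])) g := by
  unfold cornerStepA dictStep
  simp only [List.foldl_cons, List.foldl_nil]
  by_cases hv : getCell g 0 ((W : Int) - 1) = 7
  · rw [if_pos hv, if_pos hv]
  · rw [if_neg hv, if_neg hv]
    have h0 : setCell (applyUpd u g) 0 ((W : Int) - 1) 7
        = applyUpd (u.insert (0, (W : Int) - 1) 7) g :=
      (applyUpd_insert g W hrect u 0 ((W : Int) - 1) 7 le_rfl (by omega) (by omega) (by omega)).symm
    by_cases hW1 : W = 1
    · rw [if_pos (⟨trivial, by omega⟩ : True ∧ (W : Int) - 1 = 0)]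
      rw [if_neg (show ¬((0:Int) + 1 < (g.length : Int) ∧ (W : Int) - 1 + 1 < (W : Int)) by omega)]
      rw [if_neg (show ¬((0:Int) + 1 < (g.length : Int) ∧ (W : Int) - 1 + 2 < (W : Int)) by omega)]
      rw [if_neg (show ¬((0:Int) + 2 < (g.length : Int) ∧ (W : Int) - 1 + 1 < (W : Int)) by omega)]
      rw [if_neg (show ¬((0:Int) + 2 < (g.length : Int) ∧ (W : Int) - 1 + 2 < (W : Int)) by omega)]
      rw [if_neg (show ¬((0:Int) ≤ 0 + 1 ∧ (0:Int) + 1 < (g.length : Int) ∧ ((0:Int) ≤ (W : Int) - 1 + -2 ∧ (W : Int) - 1 + -2 < (W : Int))) by omega)]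
      rw [if_neg (show ¬((0:Int) ≤ 0 + 1 ∧ (0:Int) + 1 < (g.length : Int) ∧ ((0:Int) ≤ (W : Int) - 1 + -1 ∧ (W : Int) - 1 + -1 < (W : Int))) by omega)]
      rw [if_neg (show ¬((0:Int) ≤ 0 + 2 ∧ (0:Int) + 2 < (g.length : Int) ∧ ((0:Int) ≤ (W : Int) - 1 + -2 ∧ (W : Int) - 1 + -2 < (W : Int))) by omega)]
      rw [if_neg (show ¬((0:Int) ≤ 0 + 2 ∧ (0:Int) + 2 < (g.length : Int) ∧ ((0:Int) ≤ (W : Int) - 1 + -1 ∧ (W : Int) - 1 + -1 < (W : Int))) by omega)]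
      exact h0
    · rw [if_neg (show ¬(True ∧ (W : Int) - 1 = 0) from fun h => absurd h.2 (by omega))]
      rw [if_pos (⟨trivial, trivial⟩ : True ∧ True)]
      have h1 := gw g W hrect _ _ (0 + 1) ((W : Int) - 1 + -2) (getCell g 0 ((W : Int) - 1))
        ((0:Int) + 1 < (g.length : Int) ∧ (0:Int) ≤ (W : Int) - 1 + -2)
        ((0:Int) ≤ 0 + 1 ∧ (0:Int) + 1 < (g.length : Int) ∧ ((0:Int) ≤ (W : Int) - 1 + -2 ∧ (W : Int) - 1 + -2 < (W : Int)))
        h0 (by omega) (by omega)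
      have h2 := gw g W hrect _ _ (0 + 1) ((W : Int) - 1 + -1) (getCell g 0 ((W : Int) - 1))
        ((0:Int) + 1 < (g.length : Int) ∧ (0:Int) ≤ (W : Int) - 1 + -1)
        ((0:Int) ≤ 0 + 1 ∧ (0:Int) + 1 < (g.length : Int) ∧ ((0:Int) ≤ (W : Int) - 1 + -1 ∧ (W : Int) - 1 + -1 < (W : Int)))
        h1 (by omega) (by omega)
      have h3 := gw g W hrect _ _ (0 + 2) ((W : Int) - 1 + -2) (getCell g 0 ((W : Int) - 1))
        ((0:Int) + 2 < (g.length : Int) ∧ (0:Int) ≤ (W : Int) - 1 + -2)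
        ((0:Int) ≤ 0 + 2 ∧ (0:Int) + 2 < (g.length : Int) ∧ ((0:Int) ≤ (W : Int) - 1 + -2 ∧ (W : Int) - 1 + -2 < (W : Int)))
        h2 (by omega) (by omega)
      have h4 := gw g W hrect _ _ (0 + 2) ((W : Int) - 1 + -1) (getCell g 0 ((W : Int) - 1))
        ((0:Int) + 2 < (g.length : Int) ∧ (0:Int) ≤ (W : Int) - 1 + -1)
        ((0:Int) ≤ 0 + 2 ∧ (0:Int) + 2 < (g.length : Int) ∧ ((0:Int) ≤ (W : Int) - 1 + -1 ∧ (W : Int) - 1 + -1 < (W : Int)))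
        h3 (by omega) (by omega)
      exact h4

lemma slot3_sim (g : List (List Int)) (W : Nat) (hrect : ∀ row ∈ g, row.length = W)
    (hg : 1 ≤ g.length) (hW : 1 ≤ W) (u : PySem.Dict (Int × Int) Int) :
    cornerStepA g (g.length : Int) (W : Int) (applyUpd u g) ((g.length : Int) - 1, 0)
      = applyUpd (dictStep g (g.length : Int) (W : Int) u
          ((g.length : Int) - 1, 0, [(-3, 2), (-2, 2), (-1, 3)])) g := by
  unfold cornerStepA dictStep
  simp only [List.foldl_cons, List.foldl_nil]
  by_cases hv : getCell g ((g.length : Int) - 1) 0 = 7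
  · rw [if_pos hv, if_pos hv]
  · rw [if_neg hv, if_neg hv]
    have h0 : setCell (applyUpd u g) ((g.length : Int) - 1) 0 7
        = applyUpd (u.insert ((g.length : Int) - 1, 0) 7) g :=
      (applyUpd_insert g W hrect u ((g.length : Int) - 1) 0 7 (by omega) (by omega) le_rfl (by omega)).symm
    by_cases hR1 : g.length = 1
    · rw [if_pos (⟨by omega, trivial⟩ : (g.length : Int) - 1 = 0 ∧ True)]
      rw [if_neg (show ¬((g.length : Int) - 1 + 1 < (g.length : Int) ∧ (0:Int) + 1 < (W : Int)) by omega)]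
      rw [if_neg (show ¬((g.length : Int) - 1 + 1 < (g.length : Int) ∧ (0:Int) + 2 < (W : Int)) by omega)]
      rw [if_neg (show ¬((g.length : Int) - 1 + 2 < (g.length : Int) ∧ (0:Int) + 1 < (W : Int)) by omega)]
      rw [if_neg (show ¬((g.length : Int) - 1 + 2 < (g.length : Int) ∧ (0:Int) + 2 < (W : Int)) by omega)]
      rw [if_neg (show ¬((0:Int) ≤ (g.length : Int) - 1 + -3 ∧ (g.length : Int) - 1 + -3 < (g.length : Int) ∧ ((0:Int) ≤ 0 + 2 ∧ (0:Int) + 2 < (W : Int))) by omega)]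
      rw [if_neg (show ¬((0:Int) ≤ (g.length : Int) - 1 + -2 ∧ (g.length : Int) - 1 + -2 < (g.length : Int) ∧ ((0:Int) ≤ 0 + 2 ∧ (0:Int) + 2 < (W : Int))) by omega)]
      rw [if_neg (show ¬((0:Int) ≤ (g.length : Int) - 1 + -1 ∧ (g.length : Int) - 1 + -1 < (g.length : Int) ∧ ((0:Int) ≤ 0 + 3 ∧ (0:Int) + 3 < (W : Int))) by omega)]
      exact h0
    · rw [if_neg (show ¬((g.length : Int) - 1 = 0 ∧ True) from fun h => absurd h.1 (by omega))]
      rw [if_neg (show ¬((g.length : Int) - 1 = 0 ∧ (0:Int) = (W : Int) - 1) from fun h => absurd h.1 (by omega))]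
      rw [if_pos (⟨trivial, trivial⟩ : True ∧ True)]
      have h1 := gw g W hrect _ _ ((g.length : Int) - 1 + -3) (0 + 2) (getCell g ((g.length : Int) - 1) 0)
        ((0:Int) ≤ (g.length : Int) - 1 + -3 ∧ (g.length : Int) - 1 + -3 < (g.length : Int) ∧ ((0:Int) ≤ 0 + 2 ∧ (0:Int) + 2 < (W : Int)))
        ((0:Int) ≤ (g.length : Int) - 1 + -3 ∧ (g.length : Int) - 1 + -3 < (g.length : Int) ∧ ((0:Int) ≤ 0 + 2 ∧ (0:Int) + 2 < (W : Int)))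
        h0 Iff.rfl (by omega)
      have h2 := gw g W hrect _ _ ((g.length : Int) - 1 + -2) (0 + 2) (getCell g ((g.length : Int) - 1) 0)
        ((0:Int) ≤ (g.length : Int) - 1 + -2 ∧ (g.length : Int) - 1 + -2 < (g.length : Int) ∧ ((0:Int) ≤ 0 + 2 ∧ (0:Int) + 2 < (W : Int)))
        ((0:Int) ≤ (g.length : Int) - 1 + -2 ∧ (g.length : Int) - 1 + -2 < (g.length : Int) ∧ ((0:Int) ≤ 0 + 2 ∧ (0:Int) + 2 < (W : Int)))
        h1 Iff.rfl (by omega)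
      have h3 := gw g W hrect _ _ ((g.length : Int) - 1 + -1) (0 + 3) (getCell g ((g.length : Int) - 1) 0)
        ((0:Int) ≤ (g.length : Int) - 1 + -1 ∧ (g.length : Int) - 1 + -1 < (g.length : Int) ∧ ((0:Int) ≤ 0 + 3 ∧ (0:Int) + 3 < (W : Int)))
        ((0:Int) ≤ (g.length : Int) - 1 + -1 ∧ (g.length : Int) - 1 + -1 < (g.length : Int) ∧ ((0:Int) ≤ 0 + 3 ∧ (0:Int) + 3 < (W : Int)))
        h2 Iff.rfl (by omega)
      exact h3

lemma slot4_sim (g : List (List Int)) (W : Nat) (hrect : ∀ row ∈ g, row.length = W)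
    (hg : 1 ≤ g.length) (hW : 1 ≤ W) (u : PySem.Dict (Int × Int) Int) :
    cornerStepA g (g.length : Int) (W : Int) (applyUpd u g) ((g.length : Int) - 1, (W : Int) - 1)
      = applyUpd (dictStep g (g.length : Int) (W : Int) u
          ((g.length : Int) - 1, (W : Int) - 1, [(-3, -2), (-2, -2), (-1, -3)])) g := by
  unfold cornerStepA dictStep
  simp only [List.foldl_cons, List.foldl_nil]
  by_cases hv : getCell g ((g.length : Int) - 1) ((W : Int) - 1) = 7
  · rw [if_pos hv, if_pos hv]
  · rw [if_neg hv, if_neg hv]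
    have h0 : setCell (applyUpd u g) ((g.length : Int) - 1) ((W : Int) - 1) 7
        = applyUpd (u.insert ((g.length : Int) - 1, (W : Int) - 1) 7) g :=
      (applyUpd_insert g W hrect u ((g.length : Int) - 1) ((W : Int) - 1) 7 (by omega) (by omega) (by omega) (by omega)).symm
    have hBneg1 : g.length = 1 → ¬((0:Int) ≤ (g.length : Int) - 1 + -3 ∧ (g.length : Int) - 1 + -3 < (g.length : Int) ∧ ((0:Int) ≤ (W : Int) - 1 + -2 ∧ (W : Int) - 1 + -2 < (W : Int))) := by omega
    have hBneg2 : g.length = 1 → ¬((0:Int) ≤ (g.length : Int) - 1 + -2 ∧ (g.length : Int) - 1 + -2 < (g.length : Int) ∧ ((0:Int) ≤ (W : Int) - 1 + -2 ∧ (W : Int) - 1 + -2 < (W : Int))) := by omega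
    have hBneg3 : g.length = 1 → ¬((0:Int) ≤ (g.length : Int) - 1 + -1 ∧ (g.length : Int) - 1 + -1 < (g.length : Int) ∧ ((0:Int) ≤ (W : Int) - 1 + -3 ∧ (W : Int) - 1 + -3 < (W : Int))) := by omega
    by_cases hR1 : g.length = 1
    · by_cases hW1 : W = 1
      · rw [if_pos (⟨by omega, by omega⟩ : (g.length : Int) - 1 = 0 ∧ (W : Int) - 1 = 0)]
        rw [if_neg (show ¬((g.length : Int) - 1 + 1 < (g.length : Int) ∧ (W : Int) - 1 + 1 < (W : Int)) by omega)]
        rw [if_neg (show ¬((g.length : Int) - 1 + 1 < (g.length : Int) ∧ (W : Int) - 1 + 2 < (W : Int)) by omega)]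
        rw [if_neg (show ¬((g.length : Int) - 1 + 2 < (g.length : Int) ∧ (W : Int) - 1 + 1 < (W : Int)) by omega)]
        rw [if_neg (show ¬((g.length : Int) - 1 + 2 < (g.length : Int) ∧ (W : Int) - 1 + 2 < (W : Int)) by omega)]
        rw [if_neg (hBneg1 hR1), if_neg (hBneg2 hR1), if_neg (hBneg3 hR1)]
        exact h0
      · rw [if_neg (show ¬((g.length : Int) - 1 = 0 ∧ (W : Int) - 1 = 0) from fun h => absurd h.2 (by omega))]
        rw [if_pos (⟨by omega, trivial⟩ : (g.length : Int) - 1 = 0 ∧ True)]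
        rw [if_neg (show ¬((g.length : Int) - 1 + 1 < (g.length : Int) ∧ (0:Int) ≤ (W : Int) - 1 + -2) by omega)]
        rw [if_neg (show ¬((g.length : Int) - 1 + 1 < (g.length : Int) ∧ (0:Int) ≤ (W : Int) - 1 + -1) by omega)]
        rw [if_neg (show ¬((g.length : Int) - 1 + 2 < (g.length : Int) ∧ (0:Int) ≤ (W : Int) - 1 + -2) by omega)]
        rw [if_neg (show ¬((g.length : Int) - 1 + 2 < (g.length : Int) ∧ (0:Int) ≤ (W : Int) - 1 + -1) by omega)]
        rw [if_neg (hBneg1 hR1), if_neg (hBneg2 hR1), if_neg (hBneg3 hR1)]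
        exact h0
    · by_cases hW1 : W = 1
      · rw [if_neg (show ¬((g.length : Int) - 1 = 0 ∧ (W : Int) - 1 = 0) from fun h => absurd h.1 (by omega))]
        rw [if_neg (show ¬((g.length : Int) - 1 = 0 ∧ True) from fun h => absurd h.1 (by omega))]
        rw [if_pos (⟨trivial, by omega⟩ : True ∧ (W : Int) - 1 = 0)]
        rw [if_neg (show ¬((0:Int) ≤ (g.length : Int) - 1 + -3 ∧ (g.length : Int) - 1 + -3 < (g.length : Int) ∧ ((0:Int) ≤ (W : Int) - 1 + 2 ∧ (W : Int) - 1 + 2 < (W : Int))) by omega)]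
        rw [if_neg (show ¬((0:Int) ≤ (g.length : Int) - 1 + -2 ∧ (g.length : Int) - 1 + -2 < (g.length : Int) ∧ ((0:Int) ≤ (W : Int) - 1 + 2 ∧ (W : Int) - 1 + 2 < (W : Int))) by omega)]
        rw [if_neg (show ¬((0:Int) ≤ (g.length : Int) - 1 + -1 ∧ (g.length : Int) - 1 + -1 < (g.length : Int) ∧ ((0:Int) ≤ (W : Int) - 1 + 3 ∧ (W : Int) - 1 + 3 < (W : Int))) by omega)]
        rw [if_neg (show ¬((0:Int) ≤ (g.length : Int) - 1 + -3 ∧ (g.length : Int) - 1 + -3 < (g.length : Int) ∧ ((0:Int) ≤ (W : Int) - 1 + -2 ∧ (W : Int) - 1 + -2 < (W : Int))) by omega)]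
        rw [if_neg (show ¬((0:Int) ≤ (g.length : Int) - 1 + -2 ∧ (g.length : Int) - 1 + -2 < (g.length : Int) ∧ ((0:Int) ≤ (W : Int) - 1 + -2 ∧ (W : Int) - 1 + -2 < (W : Int))) by omega)]
        rw [if_neg (show ¬((0:Int) ≤ (g.length : Int) - 1 + -1 ∧ (g.length : Int) - 1 + -1 < (g.length : Int) ∧ ((0:Int) ≤ (W : Int) - 1 + -3 ∧ (W : Int) - 1 + -3 < (W : Int))) by omega)]
        exact h0
      · rw [if_neg (show ¬((g.length : Int) - 1 = 0 ∧ (W : Int) - 1 = 0) from fun h => absurd h.1 (by omega))]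
        rw [if_neg (show ¬((g.length : Int) - 1 = 0 ∧ True) from fun h => absurd h.1 (by omega))]
        rw [if_neg (show ¬(True ∧ (W : Int) - 1 = 0) from fun h => absurd h.2 (by omega))]
        rw [if_pos (⟨trivial, trivial⟩ : True ∧ True)]
        have h1 := gw g W hrect _ _ ((g.length : Int) - 1 + -3) ((W : Int) - 1 + -2) (getCell g ((g.length : Int) - 1) ((W : Int) - 1))
          ((0:Int) ≤ (g.length : Int) - 1 + -3 ∧ (g.length : Int) - 1 + -3 < (g.length : Int) ∧ ((0:Int) ≤ (W : Int) - 1 + -2 ∧ (W : Int) - 1 + -2 < (W : Int)))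
          ((0:Int) ≤ (g.length : Int) - 1 + -3 ∧ (g.length : Int) - 1 + -3 < (g.length : Int) ∧ ((0:Int) ≤ (W : Int) - 1 + -2 ∧ (W : Int) - 1 + -2 < (W : Int)))
          h0 Iff.rfl (by omega)
        have h2 := gw g W hrect _ _ ((g.length : Int) - 1 + -2) ((W : Int) - 1 + -2) (getCell g ((g.length : Int) - 1) ((W : Int) - 1))
          ((0:Int) ≤ (g.length : Int) - 1 + -2 ∧ (g.length : Int) - 1 + -2 < (g.length : Int) ∧ ((0:Int) ≤ (W : Int) - 1 + -2 ∧ (W : Int) - 1 + -2 < (W : Int)))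
          ((0:Int) ≤ (g.length : Int) - 1 + -2 ∧ (g.length : Int) - 1 + -2 < (g.length : Int) ∧ ((0:Int) ≤ (W : Int) - 1 + -2 ∧ (W : Int) - 1 + -2 < (W : Int)))
          h1 Iff.rfl (by omega)
        have h3 := gw g W hrect _ _ ((g.length : Int) - 1 + -1) ((W : Int) - 1 + -3) (getCell g ((g.length : Int) - 1) ((W : Int) - 1))
          ((0:Int) ≤ (g.length : Int) - 1 + -1 ∧ (g.length : Int) - 1 + -1 < (g.length : Int) ∧ ((0:Int) ≤ (W : Int) - 1 + -3 ∧ (W : Int) - 1 + -3 < (W : Int)))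
          ((0:Int) ≤ (g.length : Int) - 1 + -1 ∧ (g.length : Int) - 1 + -1 < (g.length : Int) ∧ ((0:Int) ≤ (W : Int) - 1 + -3 ∧ (W : Int) - 1 + -3 < (W : Int)))
          h2 Iff.rfl (by omega)
        exact h3


lemma applyUpd_empty (g : List (List Int)) : applyUpd PySem.Dict.empty g = g := by
  apply List.ext_getElem?
  intro i
  rw [getElem?_applyUpd]
  simp [PySem.Dict.getD_empty, PySem.List.map_snd_enumerate]

lemma getD_foldl_gins (r c rows cols v : Int) (offs : List (Int × Int))
    (u : PySem.Dict (Int × Int) Int) (k : Int × Int) (d : Int) :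
    (offs.foldl (fun u o =>
        if 0 ≤ r + o.1 ∧ r + o.1 < rows ∧ (0 ≤ c + o.2 ∧ c + o.2 < cols)
        then u.insert (r + o.1, c + o.2) v else u) u).getD k d
    = if ∃ o ∈ offs, (0 ≤ r + o.1 ∧ r + o.1 < rows ∧ (0 ≤ c + o.2 ∧ c + o.2 < cols)) ∧ k = (r + o.1, c + o.2)
      then v else u.getD k d := by
  induction offs generalizing u with
  | nil => simp
  | cons o rest ih =>
    simp only [List.foldl_cons, ih, List.exists_mem_cons_iff]
    by_cases hrest : ∃ o ∈ rest, (0 ≤ r + o.1 ∧ r + o.1 < rows ∧ (0 ≤ c + o.2 ∧ c + o.2 < cols)) ∧ k = (r + o.1, c + o.2)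
    · rw [if_pos hrest, if_pos (Or.inr hrest)]
    · rw [if_neg hrest]
      by_cases hg : 0 ≤ r + o.1 ∧ r + o.1 < rows ∧ (0 ≤ c + o.2 ∧ c + o.2 < cols)
      · rw [if_pos hg, PySem.Dict.getD_insert]
        by_cases hk : k = (r + o.1, c + o.2)
        · rw [if_pos hk, if_pos (Or.inl ⟨hg, hk⟩)]
        · rw [if_neg hk, if_neg (by rintro (⟨_, h⟩ | h); exact hk h; exact hrest h)]
      · rw [if_neg hg, if_neg (by rintro (⟨h, _⟩ | h); exact hg h; exact hrest h)]

lemma getD_dictStep (grid : List (List Int)) (rows cols : Int)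
    (u : PySem.Dict (Int × Int) Int) (r c : Int) (offs : List (Int × Int)) (k : Int × Int) (d : Int) :
    (dictStep grid rows cols u (r, c, offs)).getD k d
    = if getCell grid r c = 7 then u.getD k d
      else if ∃ o ∈ offs, (0 ≤ r + o.1 ∧ r + o.1 < rows ∧ (0 ≤ c + o.2 ∧ c + o.2 < cols)) ∧ k = (r + o.1, c + o.2)
        then getCell grid r c
      else if k = (r, c) then 7
      else u.getD k d := by
  unfold dictStep
  dsimp only
  by_cases hv : getCell grid r c = 7
  · rw [if_pos hv, if_pos hv]
  · rw [if_neg hv, if_neg hv, getD_foldl_gins, PySem.Dict.getD_insert]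

lemma hitIff1 (R W i j : Int) (hi : 0 ≤ i) (hi2 : i < R) (hj : 0 ≤ j) (hj2 : j < W) :
    (∃ o ∈ ([(1, 1), (1, 2), (2, 1), (2, 2)] : List (Int × Int)),
        (0 ≤ (0:Int) + o.1 ∧ (0:Int) + o.1 < R ∧ (0 ≤ (0:Int) + o.2 ∧ (0:Int) + o.2 < W)) ∧
        ((i, j) : Int × Int) = (0 + o.1, 0 + o.2))
    ↔ ((offsB R W 0 0).any (fun o => decide (i = 0 + o.1 ∧ j = 0 + o.2)) = true) := by
  simp [offsB, Prod.mk.injEq]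
  omega

lemma hitIff2 (R W i j : Int) (hi : 0 ≤ i) (hi2 : i < R) (hj : 0 ≤ j) (hj2 : j < W) :
    (∃ o ∈ ([(1, -2), (1, -1), (2, -2), (2, -1)] : List (Int × Int)),
        (0 ≤ (0:Int) + o.1 ∧ (0:Int) + o.1 < R ∧ (0 ≤ W - 1 + o.2 ∧ W - 1 + o.2 < W)) ∧
        ((i, j) : Int × Int) = (0 + o.1, W - 1 + o.2))
    ↔ ((offsB R W 0 (W - 1)).any (fun o => decide (i = 0 + o.1 ∧ j = W - 1 + o.2)) = true) := by
  by_cases hW1 : W - 1 = 0 <;>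
    simp [offsB, hW1, Prod.mk.injEq] <;> omega

lemma hitIff3 (R W i j : Int) (hi : 0 ≤ i) (hi2 : i < R) (hj : 0 ≤ j) (hj2 : j < W) :
    (∃ o ∈ ([(-3, 2), (-2, 2), (-1, 3)] : List (Int × Int)),
        (0 ≤ R - 1 + o.1 ∧ R - 1 + o.1 < R ∧ (0 ≤ (0:Int) + o.2 ∧ (0:Int) + o.2 < W)) ∧
        ((i, j) : Int × Int) = (R - 1 + o.1, 0 + o.2))
    ↔ ((offsB R W (R - 1) 0).any (fun o => decide (i = R - 1 + o.1 ∧ j = 0 + o.2)) = true) := by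
  by_cases hR1 : R - 1 = 0 <;>
    simp [offsB, hR1, Prod.mk.injEq] <;> omega

lemma hitIff4 (R W i j : Int) (hi : 0 ≤ i) (hi2 : i < R) (hj : 0 ≤ j) (hj2 : j < W) :
    (∃ o ∈ ([(-3, -2), (-2, -2), (-1, -3)] : List (Int × Int)),
        (0 ≤ R - 1 + o.1 ∧ R - 1 + o.1 < R ∧ (0 ≤ W - 1 + o.2 ∧ W - 1 + o.2 < W)) ∧
        ((i, j) : Int × Int) = (R - 1 + o.1, W - 1 + o.2))
    ↔ ((offsB R W (R - 1) (W - 1)).any (fun o => decide (i = R - 1 + o.1 ∧ j = W - 1 + o.2)) = true) := by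
  by_cases hR1 : R - 1 = 0 <;> by_cases hW1 : W - 1 = 0 <;>
    simp [offsB, hR1, hW1, Prod.mk.injEq] <;> omega

-- the dict of pending updates, read back at one in-range cell, is exactly Source B's reverse scan
lemma cell_eq (grid : List (List Int)) (W : Nat) (i j : Int)
    (hi : 0 ≤ i) (hi2 : i < (grid.length : Int)) (hj : 0 ≤ j) (hj2 : j < (W : Int)) (d : Int)
    (hd : d = getCell grid i j) :
    (dictStep grid (grid.length : Int) (W : Int)
      (dictStep grid (grid.length : Int) (W : Int)
        (dictStep grid (grid.length : Int) (W : Int)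
          (dictStep grid (grid.length : Int) (W : Int) PySem.Dict.empty
            (0, 0, [(1, 1), (1, 2), (2, 1), (2, 2)]))
          (0, (W : Int) - 1, [(1, -2), (1, -1), (2, -2), (2, -1)]))
        ((grid.length : Int) - 1, 0, [(-3, 2), (-2, 2), (-1, 3)]))
      ((grid.length : Int) - 1, (W : Int) - 1, [(-3, -2), (-2, -2), (-1, -3)])).getD (i, j) d
    = cellLoop grid (grid.length : Int) (W : Int) i j
        [((grid.length : Int) - 1, (W : Int) - 1), ((grid.length : Int) - 1, 0),
         (0, (W : Int) - 1), (0, 0)] := by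
  rw [getD_dictStep, getD_dictStep, getD_dictStep, getD_dictStep, PySem.Dict.getD_empty]
  simp only [hitIff1 (grid.length : Int) (W : Int) i j hi hi2 hj hj2,
    hitIff2 (grid.length : Int) (W : Int) i j hi hi2 hj hj2,
    hitIff3 (grid.length : Int) (W : Int) i j hi hi2 hj hj2,
    hitIff4 (grid.length : Int) (W : Int) i j hi hi2 hj hj2]
  simp only [cellLoop, hd]

-- the fully accumulated dict, read back cell-by-cell, rebuilds exactly B's gathered grid
lemma applyUpd_eq_alt (grid : List (List Int))
    (hrect : ∀ row ∈ grid, row.length = (grid.headD []).length) :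
    applyUpd
      (dictStep grid (grid.length : Int) ((grid.headD []).length : Int)
        (dictStep grid (grid.length : Int) ((grid.headD []).length : Int)
          (dictStep grid (grid.length : Int) ((grid.headD []).length : Int)
            (dictStep grid (grid.length : Int) ((grid.headD []).length : Int) PySem.Dict.empty
              (0, 0, [(1, 1), (1, 2), (2, 1), (2, 2)]))
            (0, ((grid.headD []).length : Int) - 1, [(1, -2), (1, -1), (2, -2), (2, -1)]))
          ((grid.length : Int) - 1, 0, [(-3, 2), (-2, 2), (-1, 3)]))
        ((grid.length : Int) - 1, ((grid.headD []).length : Int) - 1, [(-3, -2), (-2, -2), (-1, -3)]))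
      grid
    = transform_alt grid := by
  apply List.ext_getElem?
  intro n
  rw [getElem?_applyUpd]
  simp only [transform_alt, List.reverse_cons, List.reverse_nil, List.nil_append,
    List.cons_append]
  by_cases hn : n < grid.length
  · rw [List.getElem?_eq_getElem hn,
      PySem.List.getElem?_map_pyRange_zero _ _ _ hn]
    simp only [Option.map_some, Option.some.injEq]
    have hlen : (grid[n]).length = (grid.headD []).length := hrect _ (List.getElem_mem hn)
    apply List.ext_getElem?
    intro m
    rw [getElem?_rowMap]
    by_cases hm : m < (grid.headD []).length
    · have hm' : m < (grid[n]).length := by omega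
      rw [List.getElem?_eq_getElem hm',
        PySem.List.getElem?_map_pyRange_zero _ _ _ hm]
      simp only [Option.map_some, Option.some.injEq]
      have hd : grid[n][m] = getCell grid (n : Int) (m : Int) := by
        unfold getCell
        rw [Int.toNat_natCast, Int.toNat_natCast,
          List.getD_eq_getElem _ _ hn, List.getD_eq_getElem _ _ hm']
      exact cell_eq grid (grid.headD []).length (n : Int) (m : Int)
        (by omega) (by exact_mod_cast hn) (by omega) (by exact_mod_cast hm) _ hd
    · rw [List.getElem?_eq_none (by omega), Option.map_none,
        List.getElem?_eq_none (by simp only [List.length_map, PySem.List.length_pyRange_one]; omega)]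
  · rw [List.getElem?_eq_none (by omega), Option.map_none,
      List.getElem?_eq_none (by simp only [List.length_map, PySem.List.length_pyRange_one]; omega)]

-- ===== VERDICT (by name: the statement is the Claim_ definition above) =====
theorem transform_spec : Claim_equal_transform := by
  unfold Claim_equal_transform
  intro grid _ hpre
  obtain ⟨h1, h2, hrect⟩ := hpre
  unfold Spec_transform
  have hg : 1 ≤ grid.length := List.length_pos_of_ne_nil h1
  have hW : 1 ≤ (grid.headD []).length := List.length_pos_of_ne_nil h2
  simp only [transform, List.foldl_cons, List.foldl_nil]
  have e1 := slot1_sim grid (grid.headD []).length hrect hg hW PySem.Dict.empty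
  rw [applyUpd_empty] at e1
  rw [e1, slot2_sim grid (grid.headD []).length hrect hg hW,
      slot3_sim grid (grid.headD []).length hrect hg hW,
      slot4_sim grid (grid.headD []).length hrect hg hW,
      applyUpd_eq_alt grid hrect]
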